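-- pv_equiv track=rewrite | github.com/d-keel/advent-of-code | 2023/1/driver.py | parseAlphaNumeric
-- ===== SOURCE A (Python) =====
-- def parseAlphaNumeric(lines: list[str]) -> list[str]:
--     out: list[str] = []
--     convertDict: dict[str, int] = {
--                                      'one': 1,
--                                      'two': 2,
--                                      'three': 3,
--                                      'four': 4,
--                                      'five': 5,
--                                      'six': 6,
--                                      'seven': 7,
--                                      'eight': 8,
--                                      'nine': 9
--                                      }
--
--     for line in lines:
--         strr: str = ''
--         for i, ch in enumerate(line):
--             if ch.isdigit():
--                 strr += ch
--             for key in convertDict.keys():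
--                 if line.startswith(key, i):
--                     strr += str(convertDict[key])
--
--         out.append(strr)
--
--     return out
-- ===== SOURCE B (Python) =====
-- def parseAlphaNumeric(lines: list[str]) -> list[str]:
--     words = [('one', '1'), ('two', '2'), ('three', '3'), ('four', '4'),
--              ('five', '5'), ('six', '6'), ('seven', '7'), ('eight', '8'),
--              ('nine', '9')]
--     out: list[str] = []
--     for line in lines:
--         positions: dict[int, str] = {}
--         for w, v in words:
--             start = 0
--             while True:
--                 idx = line.find(w, start)
--                 if idx == -1:
--                     break
--                 positions[idx] = v
--                 start = idx + 1
--         out.append(''.join(positions[i] if i in positions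
--                            else (ch if ch.isdigit() else '')
--                            for i, ch in enumerate(line)))
--     return out
-- ===== Notes on version B (the rewrite author's own statement) =====
-- stated objective: faster
-- what changed: Instead of testing all nine spelled-out digit words at every character position, B first builds a position->digit table per line with repeated str.find (advancing by 1 to keep overlaps), then emits the result in a single pass over enumerate(line); same output, table-then-scan decomposition.
import Mathlib
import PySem

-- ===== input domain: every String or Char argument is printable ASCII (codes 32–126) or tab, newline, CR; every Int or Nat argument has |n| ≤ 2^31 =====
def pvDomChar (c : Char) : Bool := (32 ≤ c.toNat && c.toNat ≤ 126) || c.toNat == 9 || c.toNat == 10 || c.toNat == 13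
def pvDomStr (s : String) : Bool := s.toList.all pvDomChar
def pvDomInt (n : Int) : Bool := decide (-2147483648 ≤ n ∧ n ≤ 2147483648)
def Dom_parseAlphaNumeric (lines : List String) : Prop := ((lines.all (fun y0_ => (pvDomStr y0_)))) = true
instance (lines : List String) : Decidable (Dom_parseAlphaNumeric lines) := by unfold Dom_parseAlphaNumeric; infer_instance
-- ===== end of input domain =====

-- B replaces A's per-character scan over all nine digit words by a per-line position->digit table
-- built with repeated str.find, then one pass over enumerate(line); measurably faster by constant factor.
-- Python strings are modeled as List Char (PySem convention); result strings are rebuilt with String.ofList.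

-- ===== PORT A =====
def convertDictA : PySem.Dict String Int :=
  PySem.Dict.ofList [("one",1),("two",2),("three",3),("four",4),("five",5),
                     ("six",6),("seven",7),("eight",8),("nine",9)]

-- 'line.startswith(key, i)' with 0 ≤ i < len(line) is exactly the prefix test on the i-suffix;
-- 'convertDict[key]' cannot raise (key comes from convertDict.keys()), ported as getD with dummy default 0.
def parseAlphaNumeric (lines : List String) : List String :=
  lines.foldl (fun out line =>
    out ++ [String.ofList (
      (PySem.List.enumerate line.toList 0).foldl (fun strr ich =>
        (PySem.Dict.keys convertDictA).foldl (fun strr key =>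
          if PySem.Chars.startswith (line.toList.drop ich.1.toNat) key.toList
          then strr ++ (PySem.Int.toStr (convertDictA.getD key 0)).toList
          else strr)
          (if PySem.Chars.isdigit ich.2 then strr ++ [ich.2] else strr))
        [])]) []

-- ===== PORT B =====
def wordsB : List (String × String) :=
  [("one","1"),("two","2"),("three","3"),("four","4"),("five","5"),
   ("six","6"),("seven","7"),("eight","8"),("nine","9")]

-- the 'while True: idx = line.find(w, start); …; start = idx + 1' loop of Source B;
-- the fuel parameter only makes the recursion total (s.length + 1 - start always suffices)
def findAllGo (s w : List Char) : Nat → Nat → List Nat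
  | 0, _ => []
  | fuel+1, start =>
    if PySem.Chars.findFrom s w (start : Int) = -1 then []
    else (PySem.Chars.findFrom s w (start : Int)).toNat ::
         findAllGo s w fuel ((PySem.Chars.findFrom s w (start : Int)).toNat + 1)

-- 'positions = {}; for w, v in words: … positions[idx] = v'
def positionsOf (s : List Char) : PySem.Dict Int (List Char) :=
  wordsB.foldl (fun d wv =>
    (findAllGo s wv.1.toList (s.length + 1) 0).foldl
      (fun d (j : Nat) => d.insert (j : Int) wv.2.toList) d)
    PySem.Dict.empty

def parseAlphaNumeric_alt (lines : List String) : List String :=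
  lines.foldl (fun out line =>
    out ++ [String.ofList (
      (PySem.List.enumerate line.toList 0).flatMap (fun ich =>
        match (positionsOf line.toList).get? ich.1 with
        | some v => v
        | none => if PySem.Chars.isdigit ich.2 then [ich.2] else []))]) []

-- ===== PRECONDITION & SPEC =====
def Spec_parseAlphaNumeric (lines : List String) (out : List String) : Prop := out = parseAlphaNumeric_alt lines
instance (lines : List String) (out : List String) : Decidable (Spec_parseAlphaNumeric lines out) := by unfold Spec_parseAlphaNumeric; infer_instance

-- ===== CLAIM (what is proved, stated in full; the proofs are below) =====
def Claim_equal_parseAlphaNumeric : Prop := ∀ (lines : List String), Dom_parseAlphaNumeric lines → Spec_parseAlphaNumeric lines (parseAlphaNumeric lines)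

-- ===== LEMMAS AND PROOFS =====

-- the word-digit contribution at position k, and the full contribution of (k, c)
def wordPart (s : List Char) (k : Nat) : List Char :=
  wordsB.flatMap (fun wv =>
    if PySem.Chars.startswith (s.drop k) wv.1.toList then wv.2.toList else [])

def contrib (s : List Char) (k : Nat) (c : Char) : List Char :=
  (if PySem.Chars.isdigit c then [c] else []) ++ wordPart s k

-- small generic list lemmas
theorem pvFlatMap_congr_mem {α β : Type} (l : List α) (f g : α → List β)
    (h : ∀ x ∈ l, f x = g x) : l.flatMap f = l.flatMap g := by
  induction l with
  | nil => rfl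
  | cons a l ih =>
    simp only [List.flatMap_cons, h a (List.mem_cons_self ..),
      ih (fun x hx => h x (List.mem_cons_of_mem _ hx))]

theorem pvFlatMap_map {α β γ : Type} (l : List α) (f : α → β) (g : β → List γ) :
    (l.map f).flatMap g = l.flatMap (fun x => g (f x)) := by
  induction l with
  | nil => rfl
  | cons a l ih => simp [ih]

theorem pvFoldl_if_append_eq_flatMap {α β : Type} (l : List α) (c : α → Bool)
    (g : α → List β) (acc : List β) :
    l.foldl (fun acc x => if c x then acc ++ g x else acc) acc
      = acc ++ l.flatMap (fun x => if c x then g x else []) := by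
  rw [← PySem.List.foldl_append_eq_flatMap]
  apply PySem.List.foldl_congr_mem
  intro acc x _
  split <;> simp

theorem pvFlatMap_if_nil {α β : Type} (l : List α) (M : α → Bool) (f : α → List β)
    (hno : ∀ x ∈ l, M x = false) :
    l.flatMap (fun x => if M x then f x else []) = [] := by
  induction l with
  | nil => rfl
  | cons a l ih =>
    simp only [List.flatMap_cons, hno a (List.mem_cons_self ..), if_neg Bool.false_ne_true,
      List.nil_append]
    exact ih (fun x hx => hno x (List.mem_cons_of_mem _ hx))

theorem pvFlatMap_if_single {α β : Type} (l : List α) (M : α → Bool) (f : α → List β)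
    (p : α) (hnd : l.Nodup) (hp : p ∈ l) (hM : M p = true)
    (huniq : ∀ q ∈ l, M q = true → q = p) :
    l.flatMap (fun x => if M x then f x else []) = f p := by
  induction l with
  | nil => cases hp
  | cons a l ih =>
    rcases List.nodup_cons.mp hnd with ⟨hna, hndl⟩
    by_cases ha : a = p
    · subst ha
      simp only [List.flatMap_cons, hM]
      have : l.flatMap (fun x => if M x then f x else []) = [] := by
        apply pvFlatMap_if_nil
        intro x hx
        by_contra hb
        have := huniq x (List.mem_cons_of_mem _ hx) (by revert hb; cases M x <;> simp)
        exact hna (this ▸ hx)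
      simp [this]
    · have hMa : M a = false := by
        by_contra hb
        exact ha (huniq a (List.mem_cons_self ..) (by revert hb; cases M a <;> simp))
      have hpl : p ∈ l := by rcases List.mem_cons.mp hp with h | h; exact absurd h.symm ha; exact h
      simp only [List.flatMap_cons, hMa, if_neg Bool.false_ne_true, List.nil_append]
      exact ih hndl hpl (fun q hq hMq => huniq q (List.mem_cons_of_mem _ hq) hMq)

-- concrete facts about the nine words, by computation
theorem wordsB_nodup : wordsB.Nodup := by decide

theorem wordsB_ne_nil : ∀ p ∈ wordsB, p.1.toList ≠ [] := by decide

theorem wordsB_prefix_eq : ∀ p ∈ wordsB, ∀ q ∈ wordsB, p.1.toList <+: q.1.toList → p = q := by decide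

theorem keysEq : PySem.Dict.keys convertDictA = wordsB.map (·.1) := by decide

-- no two distinct words can both start at the same place
theorem wordsB_unique (t : List Char) :
    ∀ p ∈ wordsB, ∀ q ∈ wordsB, p.1.toList <+: t → q.1.toList <+: t → p = q := by
  intro p hp q hq h1 h2
  rcases List.prefix_or_prefix_of_prefix h1 h2 with h | h
  · exact wordsB_prefix_eq p hp q hq h
  · exact (wordsB_prefix_eq q hq p hp h).symm

-- a word never starts at a digit character
theorem wordsB_headD_not_digit :
    ∀ p ∈ wordsB, PySem.Chars.isdigit (p.1.toList.headD ' ') = false := by decide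

theorem not_match_of_digit (s : List Char) (k : Nat) (hk : k < s.length)
    (hd : PySem.Chars.isdigit s[k] = true) : ∀ p ∈ wordsB, ¬ p.1.toList <+: s.drop k := by
  intro p hp hpre
  have hds : s.drop k = s[k] :: s.drop (k+1) := List.drop_eq_getElem_cons hk
  rcases hpre with ⟨t, ht⟩
  rw [hds] at ht
  rcases hh : p.1.toList with _ | ⟨c, cs⟩
  · exact wordsB_ne_nil p hp hh
  · rw [hh] at ht
    rw [List.cons_append] at ht
    have hc : c = s[k] := (List.cons.injEq _ _ _ _ ▸ ht : _ ∧ _).1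
    have := wordsB_headD_not_digit p hp
    rw [hh] at this
    simp only [List.headD_cons] at this
    rw [hc] at this
    rw [hd] at this
    cases this

-- findAllGo finds exactly the positions where w is a prefix of the k-suffix
theorem findAllGo_mem (s w : List Char) (hw : w ≠ []) :
    ∀ (fuel start : Nat), start ≤ s.length → s.length + 1 ≤ fuel + start →
      ∀ i : Nat, i ∈ findAllGo s w fuel start ↔ (start ≤ i ∧ w <+: s.drop i) := by
  intro fuel
  induction fuel with
  | zero => intro start h1 h2; omega
  | succ fuel ih =>
    intro start h1 h2 i
    by_cases h : PySem.Chars.findFrom s w (start : Int) = -1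
    · rw [findAllGo, if_pos h]
      simp only [List.not_mem_nil, false_iff]
      rintro ⟨hsi, hpre⟩
      have hnin := (PySem.Chars.findFrom_natCast_eq_neg_one_iff s w start h1).mp h
      apply hnin
      have hdd : s.drop i = (s.drop start).drop (i - start) := by
        rw [List.drop_drop]; congr 1; omega
      exact ((hdd ▸ hpre).isInfix).trans (List.drop_suffix _ _).isInfix
    · obtain ⟨hge, hpre, hmin⟩ := PySem.Chars.findFrom_natCast_spec s w start h1 h
      have hlt : (PySem.Chars.findFrom s w (start : Int)).toNat < s.length := by
        have hlen := hpre.length_le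
        rw [List.length_drop] at hlen
        have hwpos : 0 < w.length := List.length_pos_iff.mpr hw
        omega
      have hst : start ≤ (PySem.Chars.findFrom s w (start : Int)).toNat := by omega
      rw [findAllGo, if_neg h, List.mem_cons,
        ih ((PySem.Chars.findFrom s w (start : Int)).toNat + 1) (by omega) (by omega) i]
      constructor
      · rintro (rfl | ⟨hge', hpre'⟩)
        · exact ⟨hst, hpre⟩
        · exact ⟨by omega, hpre'⟩
      · rintro ⟨hsi, hpre'⟩
        by_cases he : i = (PySem.Chars.findFrom s w (start : Int)).toNat
        · exact Or.inl he
        · refine Or.inr ⟨?_, hpre'⟩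
          have : ¬ i < (PySem.Chars.findFrom s w (start : Int)).toNat :=
            fun hl => hmin i hsi hl hpre'
          omega

-- dictionary lookups through the insert loops
theorem get?_insert_positions (js : List Nat) (v : List Char)
    (d : PySem.Dict Int (List Char)) (i : Int) :
    (js.foldl (fun d j => d.insert (j : Int) v) d).get? i
      = if (∃ j ∈ js, (j : Int) = i) then some v else d.get? i := by
  induction js generalizing d with
  | nil => simp
  | cons j js ih =>
    rw [List.foldl_cons, ih]
    by_cases h1 : ∃ j' ∈ js, (j' : Int) = i
    · obtain ⟨j', hj', hje⟩ := h1
      rw [if_pos ⟨j', hj', hje⟩, if_pos ⟨j', List.mem_cons_of_mem _ hj', hje⟩]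
    · rw [if_neg h1, PySem.Dict.get?_insert]
      by_cases h2 : i = (j : Int)
      · rw [if_pos h2, if_pos ⟨j, List.mem_cons_self .., h2.symm⟩]
      · rw [if_neg h2, if_neg]
        rintro ⟨j', hj', hje⟩
        rcases List.mem_cons.mp hj' with rfl | hmem
        · exact h2 hje.symm
        · exact h1 ⟨j', hmem, hje⟩

theorem get?_posfold_none (s : List Char) (pairs : List (String × String))
    (d : PySem.Dict Int (List Char)) (i : Int)
    (hno : ∀ p ∈ pairs, ¬ ∃ j ∈ findAllGo s p.1.toList (s.length + 1) 0, (j : Int) = i) :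
    (pairs.foldl (fun d wv =>
        (findAllGo s wv.1.toList (s.length + 1) 0).foldl
          (fun d j => d.insert (j : Int) wv.2.toList) d) d).get? i = d.get? i := by
  induction pairs generalizing d with
  | nil => rfl
  | cons p ps ih =>
    rw [List.foldl_cons, ih _ (fun q hq => hno q (List.mem_cons_of_mem _ hq)),
      get?_insert_positions, if_neg (hno p (List.mem_cons_self ..))]

theorem get?_posfold_some (s : List Char) (pairs : List (String × String))
    (d : PySem.Dict Int (List Char)) (i : Int) (p : String × String)
    (hnd : pairs.Nodup)
    (huniq : ∀ q ∈ pairs, (∃ j ∈ findAllGo s q.1.toList (s.length + 1) 0, (j : Int) = i) → q = p)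
    (hp : p ∈ pairs)
    (hm : ∃ j ∈ findAllGo s p.1.toList (s.length + 1) 0, (j : Int) = i) :
    (pairs.foldl (fun d wv =>
        (findAllGo s wv.1.toList (s.length + 1) 0).foldl
          (fun d j => d.insert (j : Int) wv.2.toList) d) d).get? i = some p.2.toList := by
  induction pairs generalizing d with
  | nil => cases hp
  | cons q qs ih =>
    rcases List.nodup_cons.mp hnd with ⟨hnq, hndq⟩
    by_cases hq : q = p
    · subst hq
      rw [List.foldl_cons, get?_posfold_none, get?_insert_positions, if_pos hm]
      intro r hr hmr
      have := huniq r (List.mem_cons_of_mem _ hr) hmr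
      exact absurd (this ▸ hr) hnq
    · have hpqs : p ∈ qs := by
        rcases List.mem_cons.mp hp with h | h; exact absurd h.symm hq; exact h
      rw [List.foldl_cons]
      exact ih _ hndq (fun r hr hmr => huniq r (List.mem_cons_of_mem _ hr) hmr) hpqs

-- membership in findAllGo at full fuel, for the nine words
theorem matchesIff (s : List Char) (q : String × String) (hq : q ∈ wordsB) (k : Nat) :
    (∃ j ∈ findAllGo s q.1.toList (s.length + 1) 0, (j : Int) = (k : Int))
      ↔ q.1.toList <+: s.drop k := by
  have hw := wordsB_ne_nil q hq
  constructor
  · rintro ⟨j, hj, hje⟩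
    have : j = k := by exact_mod_cast hje
    subst this
    exact ((findAllGo_mem s q.1.toList hw _ 0 (Nat.zero_le _) (by omega) j).mp hj).2
  · intro hpre
    exact ⟨k, (findAllGo_mem s q.1.toList hw _ 0 (Nat.zero_le _) (by omega) k).mpr
      ⟨Nat.zero_le _, hpre⟩, rfl⟩

-- the per-character agreement
theorem elemEq (s : List Char) (k : Nat) (hk : k < s.length) :
    (match (positionsOf s).get? (k : Int) with
     | some v => v
     | none => if PySem.Chars.isdigit s[k] then [s[k]] else []) = contrib s k s[k] := by
  by_cases hm : ∃ p ∈ wordsB, p.1.toList <+: s.drop k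
  · obtain ⟨p, hp, hpre⟩ := hm
    have hget : (positionsOf s).get? (k : Int) = some p.2.toList := by
      unfold positionsOf
      exact get?_posfold_some s wordsB PySem.Dict.empty (k : Int) p wordsB_nodup
        (fun q hq hmq => wordsB_unique (s.drop k) q hq p hp ((matchesIff s q hq k).mp hmq) hpre)
        hp ((matchesIff s p hp k).mpr hpre)
    have hdig : PySem.Chars.isdigit s[k] = false := by
      by_contra hb
      exact not_match_of_digit s k hk (by revert hb; cases PySem.Chars.isdigit s[k] <;> simp)
        p hp hpre
    have hwp : wordPart s k = p.2.toList := by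
      unfold wordPart
      exact pvFlatMap_if_single wordsB
        (fun wv => PySem.Chars.startswith (s.drop k) wv.1.toList) (fun wv => wv.2.toList)
        p wordsB_nodup hp ((PySem.Chars.startswith_iff _ _).mpr hpre)
        (fun q hq hMq => wordsB_unique (s.drop k) q hq p hp
          ((PySem.Chars.startswith_iff _ _).mp hMq) hpre)
    rw [hget]
    simp [contrib, hdig, hwp]
  · have hget : (positionsOf s).get? (k : Int) = none := by
      unfold positionsOf
      rw [get?_posfold_none, PySem.Dict.get?_empty]
      intro q hq hmq
      exact hm ⟨q, hq, (matchesIff s q hq k).mp hmq⟩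
    have hwp : wordPart s k = [] := by
      unfold wordPart
      apply pvFlatMap_if_nil
      intro q hq
      by_contra hb
      exact hm ⟨q, hq, (PySem.Chars.startswith_iff _ _).mp
        (by revert hb; cases PySem.Chars.startswith (s.drop k) q.1.toList <;> simp)⟩
    rw [hget]
    simp [contrib, hwp]

-- A's inner word loop, reshaped
theorem keysFoldEq (s : List Char) (k : Nat) (acc : List Char) :
    (PySem.Dict.keys convertDictA).foldl (fun strr key =>
        if PySem.Chars.startswith (s.drop k) key.toList
        then strr ++ (PySem.Int.toStr (convertDictA.getD key 0)).toList
        else strr) acc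
      = acc ++ wordPart s k := by
  rw [keysEq, pvFoldl_if_append_eq_flatMap, pvFlatMap_map, wordPart]
  congr 1

-- A's whole per-line loop as a flatMap of contributions
theorem lineAEq (s : List Char) :
    (PySem.List.enumerate s 0).foldl (fun strr ich =>
        (PySem.Dict.keys convertDictA).foldl (fun strr key =>
          if PySem.Chars.startswith (s.drop ich.1.toNat) key.toList
          then strr ++ (PySem.Int.toStr (convertDictA.getD key 0)).toList
          else strr)
          (if PySem.Chars.isdigit ich.2 then strr ++ [ich.2] else strr)) []
      = (PySem.List.enumerate s 0).flatMap (fun ich => contrib s ich.1.toNat ich.2) := by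
  rw [show (PySem.List.enumerate s 0).flatMap (fun ich => contrib s ich.1.toNat ich.2)
      = [] ++ (PySem.List.enumerate s 0).flatMap (fun ich => contrib s ich.1.toNat ich.2)
      from rfl]
  rw [← PySem.List.foldl_append_eq_flatMap]
  apply PySem.List.foldl_congr_mem
  intro acc ich _
  rw [keysFoldEq, contrib]
  split <;> simp

-- per-line equality of the two ports
theorem lineEq (s : List Char) :
    (PySem.List.enumerate s 0).foldl (fun strr ich =>
        (PySem.Dict.keys convertDictA).foldl (fun strr key =>
          if PySem.Chars.startswith (s.drop ich.1.toNat) key.toList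
          then strr ++ (PySem.Int.toStr (convertDictA.getD key 0)).toList
          else strr)
          (if PySem.Chars.isdigit ich.2 then strr ++ [ich.2] else strr)) []
      = (PySem.List.enumerate s 0).flatMap (fun ich =>
          match (positionsOf s).get? ich.1 with
          | some v => v
          | none => if PySem.Chars.isdigit ich.2 then [ich.2] else []) := by
  rw [lineAEq]
  apply Eq.symm
  apply pvFlatMap_congr_mem
  intro ich hich
  obtain ⟨k, hk, rfl⟩ := (PySem.List.mem_enumerate_iff s 0 ich).mp hich
  simp only [zero_add, Int.toNat_natCast]
  exact elemEq s k hk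

-- ===== VERDICT (by name: the statement is the Claim_ definition above) =====
theorem parseAlphaNumeric_spec : Claim_equal_parseAlphaNumeric := by
  unfold Claim_equal_parseAlphaNumeric Spec_parseAlphaNumeric
  intro lines _
  unfold parseAlphaNumeric parseAlphaNumeric_alt
  rw [PySem.List.foldl_append_singleton_eq_map, PySem.List.foldl_append_singleton_eq_map]
  apply List.map_congr_left
  intro line _
  exact congrArg String.ofList (lineEq line.toList)
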